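-- pv_equiv track=rewrite | github.com/ThenTech/BDA-Assignments | Plagiarism/Resources/submissions/submissions/2177852.py | create_sequence
-- ===== SOURCE A (Python) =====
-- def create_sequence(s, index, length):
--     count = 0
--     bool = True
--     hulp = ""
--
--     while bool:
--         if index < 0:
--             if len(s) + index < 0:
--                 index = index + len(s)
--                 bool = True
--             else:
--                 count = index
--                 bool = False
--         else:
--             if index > len(s):
--                 index = index - len(s)
--                 bool = True
--             else:
--                 count = index
--                 bool = False
--
--     for i in range(length):
--         if count < len(s):
--             hulp += s[count]
--             count += 1
--         else:
--             count = 0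
--             hulp += s[count]
--             count += 1
--     return hulp
-- ===== SOURCE B (Python) =====
-- def create_sequence(s, index, length):
--     n = len(s)
--     start = index % n
--     return ''.join(s[(start + i) % n] for i in range(length))
-- ===== Notes on version B (the rewrite author's own statement) =====
-- stated objective: simpler
-- what changed: Replaces the repeated-subtraction/addition normalization while-loop and the stateful wrap-around for-loop with a single modulo for the start index and modular indexing for each output character.
-- outside the precondition, e.g. on create_sequence('', 0, 0): A returns '', B raises ZeroDivisionError
import Mathlib
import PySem

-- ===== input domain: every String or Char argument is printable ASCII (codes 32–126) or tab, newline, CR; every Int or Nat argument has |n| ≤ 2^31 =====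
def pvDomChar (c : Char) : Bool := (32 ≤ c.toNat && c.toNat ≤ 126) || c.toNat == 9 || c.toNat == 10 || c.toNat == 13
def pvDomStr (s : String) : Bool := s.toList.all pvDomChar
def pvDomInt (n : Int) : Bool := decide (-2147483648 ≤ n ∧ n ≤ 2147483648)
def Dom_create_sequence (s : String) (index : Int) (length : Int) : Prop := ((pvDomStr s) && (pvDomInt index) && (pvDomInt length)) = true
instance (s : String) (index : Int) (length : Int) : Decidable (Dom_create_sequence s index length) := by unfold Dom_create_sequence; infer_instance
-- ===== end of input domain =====

-- B replaces A's repeated-subtraction index normalization and stateful wrap-around loop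
-- with one modulo and modular indexing (objective: simpler).


-- ===== PORT A =====
-- A's while-loop: repeatedly shifts index by ±len(s) until it lands in range, then count := index.
-- The fuel argument only makes the loop total; under Pre_ (nonempty s) the fuel index.natAbs + 1
-- is never exhausted and the recursion is exactly A's loop.
def createA_norm (slen : Int) : Nat → Int → Int
  | 0, index => index
  | f + 1, index =>
    if index < 0 then
      if slen + index < 0 then createA_norm slen f (index + slen) else index
    else
      if index > slen then createA_norm slen f (index - slen) else index

-- A's for-loop over range(length), carrying count; s[count] is PySem.List.pyGetD
-- (under Pre_ the index is always in range, so the default is never used).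
def createA_build (cs : List Char) : Nat → Int → List Char
  | 0, _ => []
  | m + 1, count =>
    if count < (cs.length : Int) then
      PySem.List.pyGetD cs count ' ' :: createA_build cs m (count + 1)
    else
      PySem.List.pyGetD cs 0 ' ' :: createA_build cs m 1

def create_sequence (s : String) (index : Int) (length : Int) : String :=
  let cs := s.toList
  let count := createA_norm (cs.length : Int) (index.natAbs + 1) index
  String.mk (createA_build cs length.toNat count)

-- ===== PORT B =====
def create_sequence_alt (s : String) (index : Int) (length : Int) : String :=
  let cs := s.toList
  let n : Int := cs.length
  let start := PySem.Int.mod index n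
  String.mk ((PySem.List.pyRange 0 length 1).map
    (fun i => PySem.List.pyGetD cs (PySem.Int.mod (start + i) n) ' '))

-- ===== PRECONDITION & SPEC =====
-- Pre_ excludes the empty string: there A loops forever (index ≠ 0) or raises IndexError
-- (length > 0), and B's `index % len(s)` raises ZeroDivisionError; the only returning
-- empty-string input is the degenerate ("", 0, length ≤ 0), where A returns "".
def Pre_create_sequence (s : String) (index : Int) (length : Int) : Prop := s.toList ≠ []
instance (s : String) (index : Int) (length : Int) : Decidable (Pre_create_sequence s index length) := by unfold Pre_create_sequence; infer_instance
def pvWitness_create_sequence : String × Int × Int := ("abc", 5, 4)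

def Spec_create_sequence (s : String) (index : Int) (length : Int) (out : String) : Prop := out = create_sequence_alt s index length
instance (s : String) (index : Int) (length : Int) (out : String) : Decidable (Spec_create_sequence s index length out) := by unfold Spec_create_sequence; infer_instance

-- ===== CLAIM (what is proved, stated in full; the proofs are below) =====
def Claim_equal_create_sequence : Prop := ∀ (s : String) (index : Int) (length : Int), Dom_create_sequence s index length → Pre_create_sequence s index length → Spec_create_sequence s index length (create_sequence s index length)

-- ===== LEMMAS AND PROOFS =====

-- A's normalization loop returns a value in [-slen, slen] congruent to index mod slen.
theorem createA_norm_spec (slen : Int) (hs : 0 < slen) :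
    ∀ (fuel : Nat) (index : Int), index.natAbs < fuel →
      -slen ≤ createA_norm slen fuel index ∧ createA_norm slen fuel index ≤ slen ∧
        createA_norm slen fuel index % slen = index % slen := by
  intro fuel
  induction fuel with
  | zero => intro index h; omega
  | succ f ih =>
    intro index h
    simp only [createA_norm]
    split_ifs with h1 h2 h3
    · have := ih (index + slen) (by omega)
      refine ⟨this.1, this.2.1, ?_⟩
      rw [this.2.2, Int.add_emod_right]
    · omega
    · have := ih (index - slen) (by omega)
      refine ⟨this.1, this.2.1, ?_⟩
      rw [this.2.2, Int.sub_emod_right]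
    · omega

-- negative-in-range indexing is indexing at the floor-modulus
theorem pyGetD_emod (cs : List Char) (c : Int) (h0 : 0 < (cs.length : Int))
    (h1 : -cs.length ≤ c) (h2 : c < (cs.length : Int)) :
    PySem.List.pyGetD cs c ' ' = PySem.List.pyGetD cs (c % (cs.length : Int)) ' ' := by
  rcases le_or_gt 0 c with hc | hc
  · rw [Int.emod_eq_of_lt hc h2]
  · have hm : c % (cs.length : Int) = c + cs.length := by
      rw [← Int.add_emod_right]
      exact Int.emod_eq_of_lt (by omega) (by omega)
    rw [hm]
    simp only [PySem.List.pyGetD, PySem.List.pyGet?, PySem.List.pyIdx?]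
    have hc' : ¬ (0 ≤ c) := by omega
    have hcl : c + (cs.length : Int) < cs.length := by omega
    simp only [hc', if_false, if_pos h1]
    have : cs.length - (-c).toNat = (c + (cs.length : Int)).toNat := by omega
    rw [this, if_pos (show (0:Int) ≤ c + cs.length by omega), if_pos hcl]

-- A's build loop, started at any count in [-len, len], is modular indexing from count.
theorem createA_build_eq (cs : List Char) (h0 : 0 < (cs.length : Int)) :
    ∀ (m : Nat) (c : Int), -cs.length ≤ c → c ≤ (cs.length : Int) →
      createA_build cs m c =
        (List.range m).map (fun k : Nat => PySem.List.pyGetD cs ((c + (k : Int)) % (cs.length : Int)) ' ') := by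
  intro m
  induction m with
  | zero => intro c _ _; simp [createA_build]
  | succ m ih =>
    intro c hc1 hc2
    rw [List.range_succ_eq_map, List.map_cons, List.map_map]
    simp only [createA_build]
    split_ifs with h
    · rw [ih (c + 1) (by omega) (by omega)]
      congr 1
      · rw [pyGetD_emod cs c h0 hc1 h]
        norm_num
      · apply List.map_congr_left
        intro k _
        simp only [Function.comp_apply]
        congr 2
        push_cast
        ring
    · have hcl : c = (cs.length : Int) := by omega
      rw [ih 1 (by omega) (by omega)]
      congr 1
      · rw [hcl]
        congr 1
        push_cast
        rw [Int.add_zero, Int.emod_self]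
      · apply List.map_congr_left
        intro k _
        simp only [Function.comp_apply]
        congr 1
        rw [hcl]
        push_cast
        conv_rhs => rw [show ((cs.length : Int) + ((k : Int) + 1)) = (1 + (k : Int)) + (cs.length : Int) by ring]
        rw [Int.add_emod_right]

-- ===== VERDICT (by name: the statement is the Claim_ definition above) =====
theorem create_sequence_spec : Claim_equal_create_sequence := by
  intro s index length _ hpre
  unfold Spec_create_sequence create_sequence create_sequence_alt
  set cs := s.toList with hcs
  have h0 : 0 < (cs.length : Int) := by
    have : cs ≠ [] := hpre
    have := List.length_pos_iff.mpr this
    exact_mod_cast this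
  simp only []
  have hnorm := createA_norm_spec (cs.length : Int) h0 (index.natAbs + 1) index (by omega)
  set c0 := createA_norm (cs.length : Int) (index.natAbs + 1) index with hc0
  rw [createA_build_eq cs h0 length.toNat c0 hnorm.1 hnorm.2.1]
  congr 1
  rw [PySem.List.pyRange_one]
  simp only [Int.sub_zero, List.map_map]
  apply List.map_congr_left
  intro k _
  simp only [Function.comp_apply, Int.zero_add]
  congr 1
  rw [PySem.Int.mod_eq_emod_of_pos h0, PySem.Int.mod_eq_emod_of_pos h0]
  conv_rhs => rw [Int.add_emod, Int.emod_emod_of_dvd _ (dvd_refl _), ← Int.add_emod]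
  conv_lhs => rw [Int.add_emod, hnorm.2.2, ← Int.add_emod]
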